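-- pv_equiv track=rewrite | github.com/The-EmptyName/Advent-of-Code-2021 | Day 10/1.py | last_open
-- ===== SOURCE A (Python) =====
-- def last_open(line): # str[] line
--     opening = ["(", "[", "{", "<"]
--     for i in range(len(line)-1, -1, -1):
--         if line[i] in opening:
--             op = ")" if line[i] == "(" else ("]" if line[i] == "[" else ("}" if line[i] == "{" else ">")) # oposite
--             closed = False
--             for n in range(len(line)-1, i, -1):
--                 if line[n] == op:
--                     closed = True
--                     line[i] = "."
--                     line[n] = "."
--                     break
--             if not closed:
--                 return line[i]
--     return ""
-- ===== SOURCE B (Python) =====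
-- def last_open(line): # str[] line
--     counts = {")": 0, "]": 0, "}": 0, ">": 0}
--     match = {"(": ")", "[": "]", "{": "}", "<": ">"}
--     for s in reversed(line):
--         if s in counts:
--             counts[s] += 1
--         elif s in match:
--             if counts[match[s]] > 0:
--                 counts[match[s]] -= 1
--             else:
--                 return s
--     return ""
-- ===== Notes on version B (the rewrite author's own statement) =====
-- stated objective: alternative
-- what changed: Replaces A's nested right-to-left scans (for each opener, rescan the suffix for an unconsumed matching closer, marking consumed cells '.') with a single right-to-left pass keeping one availability counter per closer type; B also does not mutate the input list (equivalence is about the return value only).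
import Mathlib
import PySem

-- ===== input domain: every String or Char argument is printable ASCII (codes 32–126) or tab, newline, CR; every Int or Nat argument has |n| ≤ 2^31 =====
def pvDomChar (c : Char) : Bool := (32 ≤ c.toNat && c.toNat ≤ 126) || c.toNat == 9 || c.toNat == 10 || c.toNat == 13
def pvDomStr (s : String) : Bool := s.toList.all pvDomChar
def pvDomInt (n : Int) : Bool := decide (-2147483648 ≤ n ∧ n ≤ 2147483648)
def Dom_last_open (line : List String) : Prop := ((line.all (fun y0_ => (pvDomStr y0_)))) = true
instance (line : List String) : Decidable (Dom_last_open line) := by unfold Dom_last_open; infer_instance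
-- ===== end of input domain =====

-- B replaces A's nested right-to-left rescans (which mark consumed cells "." in the list) with a single
-- right-to-left pass keeping one availability counter per closer type; A mutates its argument, B does not,
-- so the equivalence proved here is about the RETURN value only.

-- ===== PORT A =====
-- opposite closer, as A's nested conditional expression
def pvOpp (s : String) : String :=
  if s = "(" then ")" else if s = "[" then "]" else if s = "{" then "}" else ">"

-- inner loop: n runs from i+k down to i+1; on a match set line[i] and line[n] to "." and stop
def pvInnerA (line : List String) (op : String) (i : Nat) : Nat → Bool × List String
  | 0 => (false, line)
  | k+1 =>
    if line.getD (i + (k+1)) "" = op then (true, (line.set i ".").set (i + (k+1)) ".")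
    else pvInnerA line op i k

-- outer loop: i runs from len-1 down to 0 (fuel j+1 means current index i = j)
def pvOuterA (line : List String) : Nat → String
  | 0 => ""
  | j+1 =>
    let s := line.getD j ""
    if s ∈ (["(", "[", "{", "<"] : List String) then
      match pvInnerA line (pvOpp s) j (line.length - 1 - j) with
      | (true, line') => pvOuterA line' j
      | (false, _) => s
    else pvOuterA line j

def last_open (line : List String) : String := pvOuterA line line.length

-- ===== PORT B =====
-- one right-to-left pass; p b c a = available counts of ")" "]" "}" ">"
def pvGoB : List String → Nat → Nat → Nat → Nat → String
  | [], _, _, _, _ => ""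
  | s :: rest, p, b, c, a =>
    if s = ")" then pvGoB rest (p+1) b c a
    else if s = "]" then pvGoB rest p (b+1) c a
    else if s = "}" then pvGoB rest p b (c+1) a
    else if s = ">" then pvGoB rest p b c (a+1)
    else if s = "(" then (if 0 < p then pvGoB rest (p-1) b c a else s)
    else if s = "[" then (if 0 < b then pvGoB rest p (b-1) c a else s)
    else if s = "{" then (if 0 < c then pvGoB rest p b (c-1) a else s)
    else if s = "<" then (if 0 < a then pvGoB rest p b c (a-1) else s)
    else pvGoB rest p b c a

def last_open_alt (line : List String) : String := pvGoB line.reverse 0 0 0 0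

-- ===== PRECONDITION & SPEC =====
def Spec_last_open (line : List String) (out : String) : Prop := out = last_open_alt line
instance (line : List String) (out : String) : Decidable (Spec_last_open line out) := by unfold Spec_last_open; infer_instance

-- ===== CLAIM (what is proved, stated in full; the proofs are below) =====
def Claim_equal_last_open : Prop := ∀ (line : List String), Dom_last_open line → Spec_last_open line (last_open line)

-- ===== LEMMAS AND PROOFS =====

-- the inner scan finds nothing when no index in its window holds op
theorem pv_inner_none (k : Nat) (L : List String) (op : String) (i : Nat)
    (h : ∀ m, i < m → m ≤ i + k → L.getD m "" ≠ op) :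
    pvInnerA L op i k = (false, L) := by
  induction k with
  | zero => rfl
  | succ k ih =>
    have hne := h (i + (k+1)) (by omega) (by omega)
    simp only [pvInnerA]
    rw [if_neg hne]
    exact ih (fun m h1 h2 => h m h1 (by omega))

-- the inner scan finds some index n in its window holding op and blanks i and n
theorem pv_inner_found (k : Nat) (L : List String) (op : String) (i : Nat)
    (h : ∃ m, i < m ∧ m ≤ i + k ∧ L.getD m "" = op) :
    ∃ n, i < n ∧ n ≤ i + k ∧ L.getD n "" = op ∧
      pvInnerA L op i k = (true, (L.set i ".").set n ".") := by
  induction k with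
  | zero => obtain ⟨m, h1, h2, _⟩ := h; omega
  | succ k ih =>
    by_cases hc : L.getD (i + (k+1)) "" = op
    · refine ⟨i + (k+1), by omega, le_refl _, hc, ?_⟩
      simp only [pvInnerA]
      rw [if_pos hc]
    · obtain ⟨m, h1, h2, h3⟩ := h
      have hm : m ≤ i + k := by
        by_contra hno
        have hEq : m = i + (k+1) := by omega
        exact hc (hEq ▸ h3)
      obtain ⟨n, hn1, hn2, hn3, hn4⟩ := ih ⟨m, h1, hm, h3⟩
      refine ⟨n, hn1, by omega, hn3, ?_⟩
      simp only [pvInnerA]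
      rw [if_neg hc]
      exact hn4

-- membership in the suffix = existence of an index in the inner scan's window
theorem pv_window (L : List String) (j : Nat) (hj : j < L.length) (op : String) :
    op ∈ L.drop (j+1) ↔ ∃ m, j < m ∧ m ≤ j + (L.length - 1 - j) ∧ L.getD m "" = op := by
  constructor
  · intro hmem
    obtain ⟨t, ht, hEq⟩ := List.mem_iff_getElem.mp hmem
    have ht' : j + 1 + t < L.length := by
      have := ht; simp [List.length_drop] at this; omega
    refine ⟨j + 1 + t, by omega, by omega, ?_⟩
    rw [List.getD_eq_getElem _ _ ht']
    rw [List.getElem_drop] at hEq; exact hEq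
  · rintro ⟨m, h1, h2, h3⟩
    have hm : m < L.length := by omega
    have hgd : L.getD m "" = L[m] := List.getD_eq_getElem _ _ hm
    rw [hgd] at h3
    apply List.mem_iff_getElem.mpr
    refine ⟨m - (j+1), by simp [List.length_drop]; omega, ?_⟩
    rw [List.getElem_drop]
    have hidx : j + 1 + (m - (j + 1)) = m := by omega
    simp only [hidx]; exact h3

-- counting after blanking one cell holding some value: for t ≠ ".", one occurrence may be removed
theorem pv_count_set (xs : List String) (idx : Nat) (h : idx < xs.length) (t : String) (ht : t ≠ ".") :
    xs.count t = (xs.set idx ".").count t + (if xs[idx] = t then 1 else 0) := by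
  have h1 : xs.set idx "." = xs.take idx ++ "." :: xs.drop (idx+1) :=
    List.set_eq_take_cons_drop _ h
  have e1 : (xs.set idx ".").count t = (xs.take idx).count t + (xs.drop (idx+1)).count t := by
    rw [h1]
    simp [List.count_append, Ne.symm ht]
  have h2 : xs = xs.take idx ++ xs[idx] :: xs.drop (idx+1) := by
    conv_lhs => rw [← List.take_append_drop idx xs, List.drop_eq_getElem_cons h]
  have e2 : xs.count t = (xs.take idx).count t + ((xs.drop (idx+1)).count t + (if xs[idx] = t then 1 else 0)) := by
    nth_rewrite 1 [h2]
    rw [List.count_append, List.count_cons]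
    by_cases hx : xs[idx] = t <;> simp [hx]
  rw [e1, e2]
  omega

-- taking strictly before a blanked cell ignores the blanking
theorem pv_take_set (L : List String) (j n : Nat) (hn : j ≤ n) :
    (L.set n ".").take j = L.take j := by
  rw [List.take_set]
  exact List.set_eq_of_length_le (by simp [List.length_take]; omega)

-- a successful inner scan: what A's blanking does to the closer counts of the suffix
theorem pv_open_found (L : List String) (j : Nat) (hjL : j < L.length) (op : String)
    (hop : op ≠ ".") (hmem : op ∈ L.drop (j+1)) :
    ∃ M : List String, pvInnerA L op j (L.length - 1 - j) = (true, M) ∧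
      M.length = L.length ∧ M.take j = L.take j ∧
      (L.drop (j+1)).count op = (M.drop j).count op + 1 ∧
      (∀ t, t ≠ "." → t ≠ op → (L.drop (j+1)).count t = (M.drop j).count t) := by
  obtain ⟨n, hn1, hn2, hn3, hn4⟩ := pv_inner_found _ L op j ((pv_window L j hjL op).mp hmem)
  have hnL : n < L.length := by omega
  have hMdrop : ((L.set j ".").set n ".").drop j = "." :: (L.drop (j+1)).set (n - (j+1)) "." := by
    rw [List.drop_set, if_neg (by omega), List.drop_set, if_neg (by omega)]
    rw [List.drop_eq_getElem_cons hjL]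
    have hz : j - j = 0 := by omega
    rw [hz, List.set_cons_zero]
    have hsucc : n - j = (n - (j+1)) + 1 := by omega
    rw [hsucc, List.set_cons_succ]
  have hidxlt : n - (j+1) < (L.drop (j+1)).length := by
    simp [List.length_drop]; omega
  have hxs : (L.drop (j+1))[n - (j+1)]'hidxlt = op := by
    rw [List.getElem_drop]
    have hidx : j + 1 + (n - (j + 1)) = n := by omega
    simp only [hidx]
    rw [← List.getD_eq_getElem L "" hnL]
    exact hn3
  refine ⟨(L.set j ".").set n ".", hn4, by simp, ?_, ?_, ?_⟩
  · rw [pv_take_set _ j n (by omega), pv_take_set _ j j (le_refl _)]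
  · rw [hMdrop]
    have := pv_count_set (L.drop (j+1)) (n - (j+1)) hidxlt op hop
    rw [hxs] at this
    rw [this]
    simp [Ne.symm hop]
  · intro t ht htop
    rw [hMdrop]
    have := pv_count_set (L.drop (j+1)) (n - (j+1)) hidxlt t ht
    rw [hxs] at this
    rw [if_neg (Ne.symm htop)] at this
    rw [this]
    simp [Ne.symm ht]

-- a failed inner scan leaves the line unchanged
theorem pv_open_none (L : List String) (j : Nat) (hjL : j < L.length) (op : String)
    (hmem : op ∉ L.drop (j+1)) :
    pvInnerA L op j (L.length - 1 - j) = (false, L) := by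
  apply pv_inner_none
  intro m h1 h2 hcon
  exact hmem ((pv_window L j hjL op).mpr ⟨m, h1, h2, hcon⟩)

-- B's step on a non-opening element: bump the matching availability counter (if any)
theorem pvGoB_cons_nonopen (s : String) (rest : List String) (p b c a : Nat)
    (h : s ∉ (["(", "[", "{", "<"] : List String)) :
    pvGoB (s :: rest) p b c a =
      pvGoB rest (p + (if s = ")" then 1 else 0)) (b + (if s = "]" then 1 else 0))
        (c + (if s = "}" then 1 else 0)) (a + (if s = ">" then 1 else 0)) := by
  simp only [List.mem_cons, not_or] at h
  obtain ⟨h1, h2, h3, h4⟩ := h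
  simp only [pvGoB, h1, h2, h3, h4]
  split_ifs <;> simp_all

-- B's step on each opener
theorem pvGoB_cons_paren (rest : List String) (p b c a : Nat) :
    pvGoB ("(" :: rest) p b c a = if 0 < p then pvGoB rest (p-1) b c a else "(" := by
  simp [pvGoB]
theorem pvGoB_cons_brack (rest : List String) (p b c a : Nat) :
    pvGoB ("[" :: rest) p b c a = if 0 < b then pvGoB rest p (b-1) c a else "[" := by
  simp [pvGoB]
theorem pvGoB_cons_brace (rest : List String) (p b c a : Nat) :
    pvGoB ("{" :: rest) p b c a = if 0 < c then pvGoB rest p b (c-1) a else "{" := by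
  simp [pvGoB]
theorem pvGoB_cons_angle (rest : List String) (p b c a : Nat) :
    pvGoB ("<" :: rest) p b c a = if 0 < a then pvGoB rest p b c (a-1) else "<" := by
  simp [pvGoB]

-- the main invariant: A's outer loop with fuel j = B run on the reversed j-prefix,
-- starting from the closer counts of the current suffix
theorem pv_main (j : Nat) : ∀ (L : List String), j ≤ L.length →
    pvOuterA L j = pvGoB ((L.take j).reverse)
      ((L.drop j).count ")") ((L.drop j).count "]") ((L.drop j).count "}") ((L.drop j).count ">") := by
  induction j with
  | zero => intro L _; simp [pvOuterA, pvGoB]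
  | succ j ih =>
    intro L hj
    have hjL : j < L.length := by omega
    have hs : L.getD j "" = L[j] := List.getD_eq_getElem _ _ hjL
    have htake : (L.take (j+1)).reverse = L[j] :: (L.take j).reverse := by
      rw [← List.take_concat_get hjL]
      simp
    have hdrop : L.drop j = L[j] :: L.drop (j+1) := List.drop_eq_getElem_cons hjL
    rw [htake]
    simp only [pvOuterA, hs]
    by_cases hopen : L[j] ∈ (["(", "[", "{", "<"] : List String)
    · -- opener cases
      rw [if_pos hopen]
      simp only [List.mem_cons, List.not_mem_nil, or_false] at hopen
      rcases hopen with h1 | h1 | h1 | h1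
      · rw [h1, pvGoB_cons_paren, show pvOpp "(" = ")" from rfl]
        by_cases hmem : (")" : String) ∈ L.drop (j+1)
        · obtain ⟨M, hM, hMlen, hMtake, hcop, hcne⟩ := pv_open_found L j hjL ")" (by decide) hmem
          rw [hM]
          show pvOuterA M j = _
          rw [if_pos (List.count_pos_iff.mpr hmem)]
          rw [ih M (by omega), hMtake]
          have e2 := hcne "]" (by decide) (by decide)
          have e3 := hcne "}" (by decide) (by decide)
          have e4 := hcne ">" (by decide) (by decide)
          rw [show (L.drop (j+1)).count ")" - 1 = (M.drop j).count ")" from by omega, e2, e3, e4]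
        · rw [pv_open_none L j hjL ")" hmem, if_neg (by simp [List.count_eq_zero.mpr hmem])]
      · rw [h1, pvGoB_cons_brack, show pvOpp "[" = "]" from rfl]
        by_cases hmem : ("]" : String) ∈ L.drop (j+1)
        · obtain ⟨M, hM, hMlen, hMtake, hcop, hcne⟩ := pv_open_found L j hjL "]" (by decide) hmem
          rw [hM]
          show pvOuterA M j = _
          rw [if_pos (List.count_pos_iff.mpr hmem)]
          rw [ih M (by omega), hMtake]
          have e2 := hcne ")" (by decide) (by decide)
          have e3 := hcne "}" (by decide) (by decide)
          have e4 := hcne ">" (by decide) (by decide)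
          rw [show (L.drop (j+1)).count "]" - 1 = (M.drop j).count "]" from by omega, e2, e3, e4]
        · rw [pv_open_none L j hjL "]" hmem, if_neg (by simp [List.count_eq_zero.mpr hmem])]
      · rw [h1, pvGoB_cons_brace, show pvOpp "{" = "}" from rfl]
        by_cases hmem : ("}" : String) ∈ L.drop (j+1)
        · obtain ⟨M, hM, hMlen, hMtake, hcop, hcne⟩ := pv_open_found L j hjL "}" (by decide) hmem
          rw [hM]
          show pvOuterA M j = _
          rw [if_pos (List.count_pos_iff.mpr hmem)]
          rw [ih M (by omega), hMtake]
          have e2 := hcne ")" (by decide) (by decide)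
          have e3 := hcne "]" (by decide) (by decide)
          have e4 := hcne ">" (by decide) (by decide)
          rw [show (L.drop (j+1)).count "}" - 1 = (M.drop j).count "}" from by omega, e2, e3, e4]
        · rw [pv_open_none L j hjL "}" hmem, if_neg (by simp [List.count_eq_zero.mpr hmem])]
      · rw [h1, pvGoB_cons_angle, show pvOpp "<" = ">" from rfl]
        by_cases hmem : (">" : String) ∈ L.drop (j+1)
        · obtain ⟨M, hM, hMlen, hMtake, hcop, hcne⟩ := pv_open_found L j hjL ">" (by decide) hmem
          rw [hM]
          show pvOuterA M j = _
          rw [if_pos (List.count_pos_iff.mpr hmem)]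
          rw [ih M (by omega), hMtake]
          have e2 := hcne ")" (by decide) (by decide)
          have e3 := hcne "]" (by decide) (by decide)
          have e4 := hcne "}" (by decide) (by decide)
          rw [show (L.drop (j+1)).count ">" - 1 = (M.drop j).count ">" from by omega, e2, e3, e4]
        · rw [pv_open_none L j hjL ">" hmem, if_neg (by simp [List.count_eq_zero.mpr hmem])]
    · -- non-opener: A skips; B bumps the matching counter (if s is a closer)
      rw [if_neg hopen, ih L (by omega), pvGoB_cons_nonopen _ _ _ _ _ _ hopen, hdrop]
      simp only [List.count_cons, beq_iff_eq]

-- ===== VERDICT (by name: the statement is the Claim_ definition above) =====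
theorem last_open_spec : Claim_equal_last_open := by
  intro line _
  unfold Spec_last_open last_open last_open_alt
  have := pv_main line.length line (le_refl _)
  simpa using this
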